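-- pv_equiv track=rewrite | github.com/mindedal/advent-of-code | 2025/07/main.py | _prepare_grid
-- ===== SOURCE A (Python) =====
-- def _prepare_grid(lines: list[str]) -> tuple[list[str], tuple[int, int]]:
--     """Pad the grid to uniform width and locate the start position.
--
--     Missing characters at the end of a row are treated as empty space (`.`).
--     Returns the padded grid and the (row, col) of `S`.
--     """
--
--     if not lines:
--         raise ValueError("Input is empty; expected a manifold diagram.")
--
--     width = max(len(line) for line in lines)
--     grid = [line.ljust(width, ".") for line in lines]
--
--     start_row = start_col = None
--     for r, row in enumerate(grid):
--         if "S" in row: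
--             start_row = r
--             start_col = row.index("S")
--             break
--
--     if start_row is None or start_col is None:
--         raise ValueError("No start position 'S' found in the diagram.")
--
--     return grid, (start_row, start_col)
-- ===== SOURCE B (Python) =====
-- def _prepare_grid(lines: list[str]) -> tuple[list[str], tuple[int, int]]:
--     """Pad the grid to uniform width and locate the start position.
--
--     Same contract as A, but the 'S' search runs over one flattened string:
--     divmod of the flat index recovers (row, col).
--     """
--
--     if not lines:
--         raise ValueError("Input is empty; expected a manifold diagram.")
--
--     width = max(len(line) for line in lines)
--     grid = [line.ljust(width, ".") for line in lines]
--
--     idx = "\n".join(grid).find("S")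
--     if idx == -1:
--         raise ValueError("No start position 'S' found in the diagram.")
--
--     return grid, divmod(idx, width + 1)
-- ===== Notes on version B (the rewrite author's own statement) =====
-- stated objective: alternative
-- what changed: The per-row scan with `in`/`.index` is replaced by one search over '\n'.join(grid): `flat.find('S')` and `divmod(idx, width + 1)` recover (row, col) arithmetically.
import Mathlib
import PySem

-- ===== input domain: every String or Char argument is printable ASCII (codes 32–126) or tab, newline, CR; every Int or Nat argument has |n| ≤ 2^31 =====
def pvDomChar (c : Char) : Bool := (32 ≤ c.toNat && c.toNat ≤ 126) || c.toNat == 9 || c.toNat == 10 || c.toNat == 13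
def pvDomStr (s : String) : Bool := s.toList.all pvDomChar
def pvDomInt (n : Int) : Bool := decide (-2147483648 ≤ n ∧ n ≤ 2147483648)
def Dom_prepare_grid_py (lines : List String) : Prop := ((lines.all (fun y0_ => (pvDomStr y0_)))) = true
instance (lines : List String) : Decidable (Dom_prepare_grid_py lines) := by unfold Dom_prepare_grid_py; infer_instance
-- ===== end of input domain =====

-- B replaces A's row-by-row 'S' scan with one find over '\n'.join(grid) plus divmod; same cost, alternative decomposition.
-- A raises ValueError on empty input and when no 'S' occurs; those inputs are outside Pre_.

-- ===== PORT A =====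
-- line.ljust(width, ".") — exact for width ≥ len(line), which is how A uses it (width is the max length)
def pvLjust (s : String) (width : Nat) : String :=
  String.ofList (s.toList ++ List.replicate (width - s.toList.length) '.')

-- the 'for r, row in enumerate(grid): if "S" in row: … break' loop (first hit, relative row index)
def pvScanRows : List String → Option (Int × Int)
  | [] => none
  | row :: rest =>
    if PySem.Str.isIn "S" row then some (0, PySem.Str.find row "S")
    else (pvScanRows rest).map (fun rc => (rc.1 + 1, rc.2))

def prepare_grid_py (lines : List String) : List String × (Int × Int) :=
  match lines with
  | [] => ([], (0, 0))   -- A raises ValueError (empty input); outside Pre_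
  | l :: t =>
    let width : Nat := (t.map (fun s => s.toList.length)).foldl max l.toList.length
    let grid := (l :: t).map (fun s => pvLjust s width)
    match pvScanRows grid with
    | some rc => (grid, rc)
    | none => (grid, (0, 0))   -- A raises ValueError (no 'S'); outside Pre_

-- ===== PORT B =====
def prepare_grid_py_alt (lines : List String) : List String × (Int × Int) :=
  match lines with
  | [] => ([], (0, 0))   -- B raises ValueError (empty input); outside Pre_
  | l :: t =>
    let width : Nat := (t.map (fun s => s.toList.length)).foldl max l.toList.length
    let grid := (l :: t).map (fun s => pvLjust s width)
    let idx := PySem.Str.find (PySem.Str.join "\n" grid) "S"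
    if idx = -1 then (grid, (0, 0))   -- B raises ValueError (no 'S'); outside Pre_
    else (grid, (PySem.Int.divmod? idx ((width : Int) + 1)).getD (0, 0))

-- ===== PRECONDITION & SPEC =====
-- A raises ValueError when lines is empty or no line contains 'S'; exactly those inputs are excluded.
def Pre_prepare_grid_py (lines : List String) : Prop :=
  lines ≠ [] ∧ lines.any (fun s => PySem.Str.isIn "S" s) = true
instance (lines : List String) : Decidable (Pre_prepare_grid_py lines) := by
  unfold Pre_prepare_grid_py; infer_instance

def pvWitness_prepare_grid_py : List String := ["ab", ".S."]

def Spec_prepare_grid_py (lines : List String) (out : List String × (Int × Int)) : Prop := out = prepare_grid_py_alt lines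
instance (lines : List String) (out : List String × (Int × Int)) : Decidable (Spec_prepare_grid_py lines out) := by unfold Spec_prepare_grid_py; infer_instance

-- ===== CLAIM (what is proved, stated in full; the proofs are below) =====
def Claim_equal_prepare_grid_py : Prop := ∀ (lines : List String), Dom_prepare_grid_py lines → Pre_prepare_grid_py lines → Spec_prepare_grid_py lines (prepare_grid_py lines)

-- ===== LEMMAS AND PROOFS =====

-- a singleton list is a prefix of s.drop i iff s[i]? is that character
lemma pv_singleton_prefix_drop (s : List Char) (c : Char) (i : Nat) :
    [c] <+: s.drop i ↔ s[i]? = some c := by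
  rw [← List.head?_drop]
  constructor
  · rintro ⟨t, ht⟩
    rw [← ht]; rfl
  · intro hd
    cases e : s.drop i with
    | nil => rw [e] at hd; simp at hd
    | cons x xs =>
      rw [e] at hd; simp at hd
      exact ⟨xs, by simp [hd]⟩

lemma pv_singleton_infix (s : List Char) (c : Char) : [c] <:+: s ↔ c ∈ s := by
  constructor
  · intro h
    exact h.sublist.subset (by simp)
  · intro h
    rcases List.append_of_mem h with ⟨l1, l2, rfl⟩
    exact ⟨l1, l2, by simp⟩

-- find points at the stated first occurrence
lemma pv_find_eq (s sub : List Char) (k : Nat)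
    (h1 : sub <+: s.drop k) (h2 : ∀ i < k, ¬ sub <+: s.drop i) :
    PySem.Chars.find s sub = k := by
  have hinf : sub <:+: s := h1.isInfix.trans (List.drop_suffix k s).isInfix
  have h0 : 0 ≤ PySem.Chars.find s sub := (PySem.Chars.find_nonneg_iff (s:=s) (sub:=sub)).mpr hinf
  obtain ⟨hp, hmin⟩ := PySem.Chars.find_spec (s := s) (sub := sub) h0
  have : (PySem.Chars.find s sub).toNat = k := by
    by_contra hne
    rcases Nat.lt_or_ge (PySem.Chars.find s sub).toNat k with hlt | hge
    · exact h2 _ hlt hp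
    · exact hmin k (by omega) h1
  omega

-- the row scan finds exactly the first 'S' of the '\n'-join, at flat index r*(W+1)+c
lemma pv_scan_spec (grid : List String) (W : Nat)
    (h : ∀ s ∈ grid, s.toList.length = W) :
    match pvScanRows grid with
    | some rc => ∃ r c : Nat, rc = ((r : Int), (c : Int)) ∧ c < W ∧
        (PySem.Chars.join ['\n'] (grid.map String.toList))[r * (W+1) + c]? = some 'S' ∧
        ∀ i < r * (W+1) + c, (PySem.Chars.join ['\n'] (grid.map String.toList))[i]? ≠ some 'S'
    | none => 'S' ∉ PySem.Chars.join ['\n'] (grid.map String.toList) := by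
  induction grid with
  | nil => simp [pvScanRows, PySem.Chars.join_nil]
  | cons row rest ih =>
    have hrow : row.toList.length = W := h row (by simp)
    have hrest : ∀ s ∈ rest, s.toList.length = W := fun s hs => h s (by simp [hs])
    have hih := ih hrest
    have hSl : ("S" : String).toList = ['S'] := by decide
    by_cases hS : PySem.Str.isIn "S" row = true
    · -- head row contains 'S'
      have hin : 'S' ∈ row.toList := by
        have := (PySem.Str.isIn_iff_infix "S" row).mp hS
        rw [hSl] at this
        exact (pv_singleton_infix _ _).mp this
      have h0 : 0 ≤ PySem.Chars.find row.toList ['S'] :=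
        (PySem.Chars.find_nonneg_iff (s := row.toList) (sub := ['S'])).mpr
          ((pv_singleton_infix _ _).mpr hin)
      obtain ⟨hp, hmin⟩ := PySem.Chars.find_spec (s := row.toList) (sub := ['S']) h0
      have hcg : row.toList[(PySem.Chars.find row.toList ['S']).toNat]? = some 'S' :=
        (pv_singleton_prefix_drop _ _ _).mp hp
      have hcl : (PySem.Chars.find row.toList ['S']).toNat < W := by
        obtain ⟨h1, -⟩ := List.getElem?_eq_some_iff.mp hcg
        omega
      simp only [pvScanRows, hS, if_pos]
      refine ⟨0, (PySem.Chars.find row.toList ['S']).toNat, ?_, hcl, ?_, ?_⟩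
      · have heq : PySem.Str.find row "S" = PySem.Chars.find row.toList ['S'] := by
          rw [PySem.Str.find_eq, hSl]
        have : ((PySem.Chars.find row.toList ['S']).toNat : Int) = PySem.Chars.find row.toList ['S'] := by omega
        rw [heq, Prod.mk.injEq]
        exact ⟨rfl, this.symm⟩
      · -- the flat join has 'S' at that index
        cases rest with
        | nil =>
          simpa [PySem.Chars.join_singleton] using hcg
        | cons q qs =>
          simp only [List.map_cons]
          rw [PySem.Chars.join_cons_cons]
          rw [List.append_assoc]
          rw [List.getElem?_append_left (by simpa [hrow] using hcl)]
          simpa using hcg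
      · intro i hi
        have hi' : i < row.toList.length := by omega
        have hrowi : row.toList[i]? ≠ some 'S' := fun hc =>
          hmin i (by simpa using hi) ((pv_singleton_prefix_drop _ _ _).mpr hc)
        cases rest with
        | nil => simpa [PySem.Chars.join_singleton] using hrowi
        | cons q qs =>
          simp only [List.map_cons]
          rw [PySem.Chars.join_cons_cons, List.append_assoc]
          rw [List.getElem?_append_left hi']
          exact hrowi
    · -- head row does not contain 'S'
      have hnot : 'S' ∉ row.toList := by
        intro hmem
        exact hS ((PySem.Str.isIn_iff_infix "S" row).mpr
          (by rw [hSl]; exact (pv_singleton_infix _ _).mpr hmem))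
      simp only [pvScanRows, hS, if_neg, Bool.false_eq_true, not_false_iff]
      cases rest with
      | nil =>
        simp only [pvScanRows, Option.map_none]
        simpa [PySem.Chars.join_singleton] using hnot
      | cons q qs =>
        simp only [List.map_cons]
        rw [PySem.Chars.join_cons_cons]
        cases escan : pvScanRows (q :: qs) with
        | none =>
          rw [escan] at hih
          simp only [Option.map_none]
          simp only [List.mem_append, List.mem_singleton]
          rintro (⟨h1 | h2⟩ | h3)
          · exact hnot h1
          · exact absurd h2 (by decide)
          · exact hih (by simpa using h3)
        | some rc =>
          rw [escan] at hih
          obtain ⟨r, c, hrc, hcW, hget, hmin⟩ := hih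
          simp only [Option.map_some]
          refine ⟨r + 1, c, ?_, hcW, ?_, ?_⟩
          · rw [hrc]; push_cast; ring_nf
          · have hlen : (row.toList ++ ['\n']).length = W + 1 := by simp [hrow]
            have hidx : (r + 1) * (W + 1) + c = (row.toList ++ ['\n']).length + (r * (W+1) + c) := by
              rw [hlen]; ring
            rw [hidx, List.getElem?_append_right (by omega)]
            simpa using hget
          · intro i hi
            have hlen : (row.toList ++ ['\n']).length = W + 1 := by simp [hrow]
            have hexp : (r + 1) * (W + 1) + c = (W + 1) + (r * (W + 1) + c) := by ring
            intro hc
            by_cases hiW : i < W + 1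
            · rw [List.getElem?_append_left (by omega)] at hc
              by_cases hir : i < W
              · rw [List.getElem?_append_left (by omega)] at hc
                exact hnot (List.mem_of_getElem? hc)
              · have hieq : i = W := by omega
                subst hieq
                rw [List.getElem?_append_right (by omega)] at hc
                rw [hrow] at hc
                simp at hc
            · rw [List.getElem?_append_right (by omega)] at hc
              rw [hlen] at hc
              exact hmin (i - (W + 1)) (by omega) hc

-- the scanned result and the flat-find/divmod result agree on any uniform-width grid
lemma pv_main (grid : List String) (W : Nat) (hW : ∀ s ∈ grid, s.toList.length = W) :
    (match pvScanRows grid with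
     | some rc => (grid, rc)
     | none => (grid, ((0 : Int), (0 : Int)))) =
    (if PySem.Str.find (PySem.Str.join "\n" grid) "S" = -1 then (grid, ((0 : Int), (0 : Int)))
     else (grid, (PySem.Int.divmod? (PySem.Str.find (PySem.Str.join "\n" grid) "S")
            ((W : Int) + 1)).getD (0, 0))) := by
  have hspec := pv_scan_spec grid W hW
  have hNl : ("\n" : String).toList = ['\n'] := by decide
  have hSl : ("S" : String).toList = ['S'] := by decide
  have hflat : (PySem.Str.join "\n" grid).toList
      = PySem.Chars.join ['\n'] (grid.map String.toList) := by
    rw [PySem.Str.toList_join, hNl]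
  cases escan : pvScanRows grid with
  | none =>
    rw [escan] at hspec
    have hfind : PySem.Str.find (PySem.Str.join "\n" grid) "S" = -1 := by
      rw [PySem.Str.find_eq, hflat, hSl]
      exact (PySem.Chars.find_eq_neg_one_iff _ _).mpr
        (fun hinf => hspec ((pv_singleton_infix _ _).mp hinf))
    rw [hfind, if_pos rfl]
  | some rc =>
    rw [escan] at hspec
    obtain ⟨r, c, rfl, hcW, hget, hmin⟩ := hspec
    have hfind : PySem.Str.find (PySem.Str.join "\n" grid) "S" = ((r * (W+1) + c : Nat) : Int) := by
      rw [PySem.Str.find_eq, hflat, hSl]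
      exact pv_find_eq _ _ _ ((pv_singleton_prefix_drop _ _ _).mpr hget)
        (fun i hi hp => hmin i hi ((pv_singleton_prefix_drop _ _ _).mp hp))
    have hne : ¬ (((r * (W+1) + c : Nat) : Int) = -1) := by omega
    have hdiv : (r * (W+1) + c) / (W+1) = r := by
      rw [Nat.mul_comm, Nat.mul_add_div (by omega), Nat.div_eq_of_lt (by omega)]
      omega
    have hmod : (r * (W+1) + c) % (W+1) = c := by
      rw [Nat.mul_comm, Nat.mul_add_mod, Nat.mod_eq_of_lt (by omega)]
    have hdm : PySem.Int.divmod? ((r * (W+1) + c : Nat) : Int) ((W : Int) + 1)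
        = some ((r : Int), (c : Int)) := by
      have hcast : ((W : Int) + 1) = ((W + 1 : Nat) : Int) := by push_cast; ring
      rw [hcast]
      simp only [PySem.Int.divmod?]
      rw [if_neg (by omega)]
      rw [← Int.ofNat_fdiv, ← Int.ofNat_fmod, hdiv, hmod]
    rw [hfind, if_neg hne, hdm]
    rfl

theorem prepare_grid_py_spec : Claim_equal_prepare_grid_py := by
  intro lines _ _
  unfold Spec_prepare_grid_py
  cases lines with
  | nil => rfl
  | cons l t =>
    unfold prepare_grid_py prepare_grid_py_alt
    refine pv_main _ _ ?_
    intro s hs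
    simp only [List.mem_map] at hs
    obtain ⟨u, hu, rfl⟩ := hs
    have hle : u.toList.length ≤ (t.map (fun s => s.toList.length)).foldl max l.toList.length := by
      rcases List.mem_cons.mp hu with rfl | hu'
      · exact (PySem.List.le_foldl_max (t.map (fun s => s.toList.length)) u.toList.length).1
      · exact (PySem.List.le_foldl_max (t.map (fun s => s.toList.length)) l.toList.length).2
          _ (List.mem_map_of_mem hu')
    simp only [pvLjust, String.toList_ofList, List.length_append, List.length_replicate]
    omega
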